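-- pv_equiv track=rewrite | github.com/maickrau/AsmToProtein | src/DatabaseOperations.py | isoform_sort_order
-- ===== SOURCE A (Python) =====
-- def isoform_sort_order(isoform):
-- 	"""
-- 	Orders isoforms so ref is first, rest ordered by A, B, C, ... ZZ, AA, AB, and novel isoforms afterwards ordered by novel_A, novel_B ...
--
-- 	Args:
-- 		isoform: Isoform name
--
-- 	Returns:
-- 		Integer describing isoform order
-- 	"""
-- 	if isoform == "ref": return 0
-- 	is_novel = False
-- 	if isoform[0:6] == "novel_":
-- 		is_novel = True
-- 		isoform = isoform[6:]
-- 	result = 1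
-- 	for c in isoform[::-1]:
-- 		result *= 26
-- 		result += ord(c) - ord('A') + 1
-- 	if is_novel:
-- 		result *= 10000 # hope there aren't more than 10000 isoforms per transcript lol
-- 	return result
-- ===== SOURCE B (Python) =====
-- def _positional(s):
--     # positional value of s where the char at index i carries weight 26**i,
--     # computed by divide and conquer: val(u+v) = val(u) + 26**len(u) * val(v)
--     if len(s) <= 1:
--         return ord(s) - ord('A') + 1 if s else 0
--     m = len(s) // 2
--     return _positional(s[:m]) + 26 ** m * _positional(s[m:])
--
-- def isoform_sort_order(isoform):
--     if isoform == "ref":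
--         return 0
--     mult = 1
--     if isoform.startswith("novel_"):
--         mult = 10000
--         isoform = isoform[6:]
--     return mult * (26 ** len(isoform) + _positional(isoform))
-- ===== Notes on version B (the rewrite author's own statement) =====
-- stated objective: alternative
-- what changed: Replaced A's linear multiply-accumulate Horner loop over the reversed string with a recursive divide-and-conquer helper: the positional value of the name is computed by splitting it in half, recursing on each half, and combining as val(u)+26**len(u)*val(v), with the leading 26**len term and the novel multiplier applied once at the end.
import Mathlib
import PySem

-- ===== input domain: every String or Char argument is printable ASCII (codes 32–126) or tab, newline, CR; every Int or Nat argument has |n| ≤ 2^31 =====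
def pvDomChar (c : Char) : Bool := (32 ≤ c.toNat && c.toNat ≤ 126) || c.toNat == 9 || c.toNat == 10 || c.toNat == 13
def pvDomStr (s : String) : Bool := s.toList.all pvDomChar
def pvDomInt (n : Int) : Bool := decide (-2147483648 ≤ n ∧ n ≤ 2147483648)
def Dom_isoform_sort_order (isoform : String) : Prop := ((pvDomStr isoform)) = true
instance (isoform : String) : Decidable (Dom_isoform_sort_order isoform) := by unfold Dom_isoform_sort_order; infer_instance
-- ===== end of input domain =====

-- B replaces A's linear Horner loop over the reversed string with a divide-and-conquer
-- positional value (split in half, combine with 26^m); alternative decomposition, same O(n) work.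


-- ===== PORT A =====
def isoform_sort_order (isoform : String) : Int :=
  if isoform = "ref" then 0
  else
    let l := isoform.toList
    -- is_novel flag and the (possibly stripped) remaining name
    let p : Bool × List Char :=
      if PySem.List.slice l (some 0) (some 6) = "novel_".toList
      then (true, PySem.List.slice l (some 6) none)
      else (false, l)
    -- for c in isoform[::-1]: result *= 26; result += ord(c) - ord('A') + 1
    let result : Int :=
      p.2.reverse.foldl (fun r c => r * 26 + ((c.toNat : Int) - 65 + 1)) 1
    if p.1 then result * 10000 else result

-- ===== PORT B =====
-- _positional: divide-and-conquer positional value (s[:m] / s[m:] → List.take / List.drop)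
def pvPositional (l : List Char) : Int :=
  if h : l.length ≤ 1 then
    match l with
    | [] => 0
    | c :: _ => (c.toNat : Int) - 65 + 1
  else
    pvPositional (l.take (l.length / 2)) + 26 ^ (l.length / 2) * pvPositional (l.drop (l.length / 2))
termination_by l.length
decreasing_by
  · simp only [List.length_take]; omega
  · simp only [List.length_drop]; omega

def isoform_sort_order_alt (isoform : String) : Int :=
  if isoform = "ref" then 0
  else
    let l := isoform.toList
    let q : Int × List Char :=
      if PySem.Chars.startswith l "novel_".toList
      then (10000, PySem.List.slice l (some 6) none)
      else (1, l)
    q.1 * ((26 : Int) ^ q.2.length + pvPositional q.2)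

-- ===== PRECONDITION & SPEC =====
def Spec_isoform_sort_order (isoform : String) (out : Int) : Prop := out = isoform_sort_order_alt isoform
instance (isoform : String) (out : Int) : Decidable (Spec_isoform_sort_order isoform out) := by unfold Spec_isoform_sort_order; infer_instance

-- ===== CLAIM (what is proved, stated in full; the proofs are below) =====
def Claim_equal_isoform_sort_order : Prop := ∀ (isoform : String), Dom_isoform_sort_order isoform → Spec_isoform_sort_order isoform (isoform_sort_order isoform)

-- ===== LEMMAS AND PROOFS =====

-- base-26 value of a char, as both ports compute it
def pvVal (c : Char) : Int := ((c.toNat : Int) - 65 + 1)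

-- positional sum Σ 26^i * pvVal (l[i]), the common characterisation
def pvH : List Char → Int
  | [] => 0
  | x :: xs => pvVal x + 26 * pvH xs

theorem pvH_append (u v : List Char) : pvH (u ++ v) = pvH u + 26 ^ u.length * pvH v := by
  induction u with
  | nil => simp [pvH]
  | cons x xs ih => simp [pvH, ih, pow_succ]; ring

theorem pvPositional_eq_aux : ∀ (n : Nat) (l : List Char), l.length = n → pvPositional l = pvH l := by
  intro n
  induction n using Nat.strong_induction_on with
  | _ n ih =>
    intro l hl
    rw [pvPositional]
    split
    · next h =>
      match l, h with
      | [], _ => simp [pvH]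
      | [c], _ => simp [pvH, pvVal]
    · next h =>
      rw [ih (l.take (l.length / 2)).length (by simp; omega) _ rfl,
          ih (l.drop (l.length / 2)).length (by simp; omega) _ rfl]
      have hsplit := pvH_append (l.take (l.length / 2)) (l.drop (l.length / 2))
      rw [List.take_append_drop] at hsplit
      rw [hsplit, List.length_take, Nat.min_eq_left (by omega)]

theorem pvPositional_eq (l : List Char) : pvPositional l = pvH l :=
  pvPositional_eq_aux l.length l rfl

theorem pvHorner (l : List Char) : ∀ a : Int,
    l.reverse.foldl (fun r c => r * 26 + pvVal c) a = a * 26 ^ l.length + pvH l := by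
  induction l with
  | nil => intro a; simp [pvH]
  | cons x xs ih =>
    intro a
    rw [List.reverse_cons, List.foldl_append, ih a]
    simp [pvH, pow_succ]
    ring

theorem pvCond (l : List Char) :
    (PySem.List.slice l (some 0) (some 6) = "novel_".toList)
      ↔ PySem.Chars.startswith l "novel_".toList = true := by
  have h6 : PySem.List.slice l (some 0) (some 6) = l.take 6 := by
    simp [pysem]
  rw [h6, PySem.Chars.startswith_iff]
  constructor
  · intro h
    rw [List.prefix_iff_eq_take]
    exact h.symm
  · intro h
    rw [List.prefix_iff_eq_take] at h
    exact h.symm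

-- ===== VERDICT (by name: the statement is the Claim_ definition above) =====
theorem isoform_sort_order_spec : Claim_equal_isoform_sort_order := by
  intro isoform _
  unfold Spec_isoform_sort_order isoform_sort_order isoform_sort_order_alt
  by_cases href : isoform = "ref"
  · simp [href]
  · simp only [href, if_false]
    by_cases hp : PySem.List.slice isoform.toList (some 0) (some 6) = "novel_".toList
    · have hb : PySem.Chars.startswith isoform.toList "novel_".toList = true := (pvCond _).mp hp
      simp only [hp, hb, if_pos]
      have hh := pvHorner (PySem.List.slice isoform.toList (some 6) none) 1
      simp only [pvVal] at hh
      simp only [hh, pvPositional_eq]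
      ring
    · have hb : PySem.Chars.startswith isoform.toList "novel_".toList ≠ true := fun h => hp ((pvCond _).mpr h)
      simp only [hp, hb, if_false, Bool.false_eq_true]
      have hh := pvHorner isoform.toList 1
      simp only [pvVal] at hh
      simp only [hh, pvPositional_eq]
      ring
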